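-- pv_equiv track=rewrite | github.com/neroden/timetable_kit | timetable_kit/text_assembly.py | and_clause
-- ===== SOURCE A (Python) =====
-- def and_clause(items: list[str]) -> list[str]:
--     """Given a list of pieces of text, returns a new list of pieces of text,
--     with the appropriate words added to make it an "and" clause if spaces are
--     put in between.
--
--     With an empty list, returns an empty list.  The odd interface is
--     designed to make this work correctly if run through " ".join()
--     """
--     if len(items) == 0:
--         return []
--
--     if len(items) == 1:
--         return items
--
--     if len(items) == 2:
--         return [items[0], "and", items[1]]
--
--     # More than two items.  Use Oxford comma.
--     comma_items = [item + "," for item in items[0:-1]]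
--     return [*comma_items, "and", items[-1]]
-- ===== SOURCE B (Python) =====
-- def and_clause(items: list[str]) -> list[str]:
--     n = len(items)
--     out = []
--     for i, item in enumerate(items):
--         if i == n - 1 and n >= 2:
--             out.append("and")
--         if n > 2 and i < n - 1:
--             out.append(item + ",")
--         else:
--             out.append(item)
--     return out
-- ===== Notes on version B (the rewrite author's own statement) =====
-- stated objective: alternative
-- what changed: Replaces A's four-way length case split (with a slice/map for the Oxford-comma case) by a single enumerate pass that decides per index whether to insert "and" and whether to append a comma.
import Mathlib
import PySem

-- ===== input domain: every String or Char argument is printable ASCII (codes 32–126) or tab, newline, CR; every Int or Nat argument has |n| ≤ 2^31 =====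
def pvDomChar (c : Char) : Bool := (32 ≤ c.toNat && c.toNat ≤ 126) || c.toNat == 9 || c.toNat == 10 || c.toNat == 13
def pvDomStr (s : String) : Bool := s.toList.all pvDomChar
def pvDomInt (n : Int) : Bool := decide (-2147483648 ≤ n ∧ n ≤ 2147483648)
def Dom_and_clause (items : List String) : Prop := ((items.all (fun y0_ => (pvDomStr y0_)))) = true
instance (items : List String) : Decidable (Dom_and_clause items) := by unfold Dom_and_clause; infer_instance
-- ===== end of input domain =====

-- B replaces A's four-way length case split by a single enumerate pass (alternative decomposition, same cost).


-- ===== PORT A =====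
-- items[0], items[1], items[-1] are in range under the length guards, so pyGetD is exact here.
def and_clause (items : List String) : List String :=
  if items.length = 0 then []
  else if items.length = 1 then items
  else if items.length = 2 then
    [PySem.List.pyGetD items 0 "", "and", PySem.List.pyGetD items 1 ""]
  else
    ((PySem.List.slice items (some 0) (some (-1))).map (fun item => item ++ ","))
      ++ ["and", PySem.List.pyGetD items (-1) ""]

-- ===== PORT B =====
def and_clause_alt (items : List String) : List String :=
  let n : Int := items.length
  (PySem.List.enumerate items).foldl
    (fun out p =>
      let out := if p.1 = n - 1 ∧ n ≥ 2 then out ++ ["and"] else out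
      if n > 2 ∧ p.1 < n - 1 then out ++ [p.2 ++ ","] else out ++ [p.2])
    []

-- ===== PRECONDITION & SPEC =====
def Spec_and_clause (items : List String) (out : List String) : Prop := out = and_clause_alt items
instance (items : List String) (out : List String) : Decidable (Spec_and_clause items out) := by unfold Spec_and_clause; infer_instance

-- ===== CLAIM (what is proved, stated in full; the proofs are below) =====
def Claim_equal_and_clause : Prop := ∀ (items : List String), Dom_and_clause items → Spec_and_clause items (and_clause items)

-- ===== LEMMAS AND PROOFS =====

-- B's fold over one segment, when the whole list is longer than 2: commas on all but
-- the globally last element, "and" inserted before it.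
theorem and_clause_alt_fold_seg (n : Int) (hn : n > 2) :
    ∀ (l : List String) (k : Int) (acc : List String) (hl : l ≠ []),
      k + l.length = n →
      (PySem.List.enumerate l k).foldl
        (fun out p =>
          let out := if p.1 = n - 1 ∧ n ≥ 2 then out ++ ["and"] else out
          if n > 2 ∧ p.1 < n - 1 then out ++ [p.2 ++ ","] else out ++ [p.2])
        acc
      = acc ++ (l.dropLast.map (fun item => item ++ ",")) ++ ["and", l.getLast hl] := by
  intro l
  induction l with
  | nil => intro k acc hl; exact absurd rfl hl
  | cons x xs ih =>
    intro k acc _ hk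
    cases xs with
    | nil =>
      have hk' : k = n - 1 := by simp at hk; omega
      subst hk'
      simp [PySem.List.enumerate, show (2:Int) ≤ n from by omega]
    | cons y ys =>
      have hk' : k + ((ys.length : Int) + 2) = n := by
        simpa [add_assoc] using hk
      have hk1 : k < n - 1 := by omega
      rw [PySem.List.enumerate_cons, List.foldl_cons]
      have hne : (y :: ys : List String) ≠ [] := by simp
      have hfirst : ¬ (k = n - 1 ∧ n ≥ 2) := by omega
      have hsecond : n > 2 ∧ k < n - 1 := ⟨hn, hk1⟩
      simp only [if_neg hfirst, if_pos hsecond]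
      rw [ih (k + 1) (acc ++ [x ++ ","]) hne (by simp only [List.length_cons]; push_cast; omega)]
      simp

theorem and_clause_eq (items : List String) : and_clause items = and_clause_alt items := by
  match items with
  | [] => rfl
  | [a] =>
    simp [and_clause, and_clause_alt, PySem.List.enumerate]
  | [a, b] =>
    simp [and_clause, and_clause_alt, PySem.List.enumerate, PySem.List.pyGetD]
  | a :: b :: c :: rest =>
    have hn : ((a :: b :: c :: rest : List String).length : Int) > 2 := by
      simp; omega
    have hne : (a :: b :: c :: rest : List String) ≠ [] := by simp
    have hfold := and_clause_alt_fold_seg _ hn (a :: b :: c :: rest) 0 [] hne (by simp)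
    unfold and_clause and_clause_alt
    simp only [hfold]
    have h0 : (a :: b :: c :: rest : List String).length ≠ 0 := by simp
    have h1 : (a :: b :: c :: rest : List String).length ≠ 1 := by simp
    have h2 : (a :: b :: c :: rest : List String).length ≠ 2 := by simp
    simp only [if_neg h0, if_neg h1, if_neg h2]
    rw [PySem.List.slice_zero_start, PySem.List.slice_to_neg_one,
        PySem.List.pyGetD_neg_one _ _ hne]
    simp

-- ===== VERDICT (by name: the statement is the Claim_ definition above) =====
theorem and_clause_spec : Claim_equal_and_clause := by
  intro items _
  unfold Spec_and_clause
  exact and_clause_eq items
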